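-- pv_equiv track=rewrite | github.com/parkerjb22/tspircs-ym | game_test/dp.py | vertical
-- ===== SOURCE A (Python) =====
-- def vertical(val, sz, sum):
--
--     for x in range(sz):
--         total = 0
--         for y in range(sz):
--             total += val[x+y*sz]
--         if (total != sum):
--             return False
--
--     return True
-- ===== SOURCE B (Python) =====
-- def vertical(val, sz, sum):
--     if sz <= 0:
--         return True
--     totals = [0] * sz
--     for i, v in enumerate(val[:sz * sz]):
--         totals[i % sz] += v
--     return all(t == sum for t in totals)
-- ===== Notes on version B (the rewrite author's own statement) =====
-- stated objective: alternative
-- what changed: Replaces A's per-column column-major nested scan (val[x+y*sz] for each column x) with a single row-major sweep over the flat list accumulating a table of sz column totals via i % sz, followed by a separate all-equal check.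
-- outside the precondition, e.g. on vertical([1, 0, 9], 2, 5): A returns False, B returns False
import Mathlib
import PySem

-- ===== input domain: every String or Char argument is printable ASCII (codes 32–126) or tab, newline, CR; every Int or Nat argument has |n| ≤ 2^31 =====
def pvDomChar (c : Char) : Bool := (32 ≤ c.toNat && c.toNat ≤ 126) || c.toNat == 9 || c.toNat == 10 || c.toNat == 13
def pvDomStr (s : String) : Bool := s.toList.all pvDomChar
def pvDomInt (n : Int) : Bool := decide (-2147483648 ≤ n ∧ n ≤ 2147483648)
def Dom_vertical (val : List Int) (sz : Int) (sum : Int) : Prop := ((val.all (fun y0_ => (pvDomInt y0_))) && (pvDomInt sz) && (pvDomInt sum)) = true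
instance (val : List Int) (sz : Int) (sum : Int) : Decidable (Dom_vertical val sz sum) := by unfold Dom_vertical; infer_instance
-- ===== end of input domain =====

-- B replaces A's per-column nested scan with one row-major sweep building a table of
-- column totals (totals[i % sz] += v) and a final all-equal check (objective: alternative).

-- ===== PORT A =====
-- inner loop: total = 0; for y in range(sz): total += val[x+y*sz]
-- (val[x+y*sz] via pyGetD: exact under Pre_vertical, where the index is always in range)
def verticalColSum (val : List Int) (sz : Int) (x : Int) : Int :=
  (PySem.List.pyRange 0 sz 1).foldl
    (fun total y => total + PySem.List.pyGetD val (x + y * sz) 0) 0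

-- outer loop with early 'return False'
def verticalLoop (val : List Int) (sz : Int) (sum : Int) : List Int → Bool
  | [] => true
  | x :: xs => if verticalColSum val sz x ≠ sum then false else verticalLoop val sz sum xs

def vertical (val : List Int) (sz : Int) (sum : Int) : Bool :=
  verticalLoop val sz sum (PySem.List.pyRange 0 sz 1)

-- ===== PORT B =====
-- totals[i % sz] += v  (index i % sz is always in range, so List.set/getD is exact)
def verticalAltStep (sz : Int) (t : List Int) (iv : Int × Int) : List Int :=
  t.set (PySem.Int.mod iv.1 sz).toNat (t.getD (PySem.Int.mod iv.1 sz).toNat 0 + iv.2)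

def vertical_alt (val : List Int) (sz : Int) (sum : Int) : Bool :=
  if sz ≤ 0 then true
  else
    let totals := (PySem.List.enumerate (PySem.List.slice val none (some (sz * sz)))).foldl
      (verticalAltStep sz) (List.replicate sz.toNat 0)
    totals.all (fun t => t == sum)

-- ===== PRECONDITION & SPEC =====
-- Pre_ excludes short lists (len(val) < sz*sz with sz > 0), on which A generally raises
-- IndexError, though A may still return False early when an initial complete column
-- already mismatches before the out-of-range access.
def Pre_vertical (val : List Int) (sz : Int) (sum : Int) : Prop :=
  sz ≤ 0 ∨ sz * sz ≤ (val.length : Int)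
instance (val : List Int) (sz : Int) (sum : Int) : Decidable (Pre_vertical val sz sum) := by
  unfold Pre_vertical; infer_instance

def pvWitness_vertical : List Int × Int × Int := ([1, 2, 2, 1], 2, 3)

def Spec_vertical (val : List Int) (sz : Int) (sum : Int) (out : Bool) : Prop := out = vertical_alt val sz sum
instance (val : List Int) (sz : Int) (sum : Int) (out : Bool) : Decidable (Spec_vertical val sz sum out) := by unfold Spec_vertical; infer_instance

-- ===== CLAIM (what is proved, stated in full; the proofs are below) =====
def Claim_equal_vertical : Prop := ∀ (val : List Int) (sz : Int) (sum : Int), Dom_vertical val sz sum → Pre_vertical val sz sum → Spec_vertical val sz sum (vertical val sz sum)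

-- ===== LEMMAS AND PROOFS =====

-- column-sum profile of B's sweep: pvS n c g s = sum of elements of g whose running
-- index (starting at s) is ≡ c (mod n)
def pvS (n : Nat) (c : Nat) : List Int → Nat → Int
  | [], _ => 0
  | v :: g, s => (if s % n = c then v else 0) + pvS n c g (s + 1)

theorem pvS_shift (n c : Nat) (g : List Int) (s : Nat) :
    pvS n c g (s + n) = pvS n c g s := by
  induction g generalizing s with
  | nil => rfl
  | cons v g ih =>
      simp only [pvS, Nat.add_mod_right]
      rw [show s + n + 1 = (s + 1) + n by omega, ih]

theorem pvS_append (n c : Nat) (g1 g2 : List Int) (s : Nat) :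
    pvS n c (g1 ++ g2) s = pvS n c g1 s + pvS n c g2 (s + g1.length) := by
  induction g1 generalizing s with
  | nil => simp [pvS]
  | cons v g1 ih =>
      simp only [List.cons_append, pvS, ih, List.length_cons]
      rw [show s + (g1.length + 1) = s + 1 + g1.length by omega]
      ring

theorem pvS_row (n c : Nat) (g : List Int) (s : Nat)
    (h : s + g.length ≤ n) :
    pvS n c g s = if s ≤ c ∧ c < s + g.length then g.getD (c - s) 0 else 0 := by
  induction g generalizing s with
  | nil => simp [pvS]
  | cons v g ih =>
      simp only [pvS, List.length_cons] at *
      rw [ih (s + 1) (by omega), Nat.mod_eq_of_lt (by omega)]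
      by_cases hc : s = c
      · subst hc
        simp [show ¬ (s + 1 ≤ s) by omega, show s ≤ s ∧ s < s + (g.length + 1) by omega]
      · by_cases hb : s + 1 ≤ c ∧ c < s + 1 + g.length
        · rw [if_neg hc, if_pos hb,
            if_pos (show s ≤ c ∧ c < s + (g.length + 1) by omega),
            show c - s = (c - (s + 1)) + 1 by omega]
          simp
        · rw [if_neg hb, if_neg hc, if_neg (by omega)]
          simp

theorem pvS_rows (n c : Nat) (hc : c < n) :
    ∀ (r : Nat) (g : List Int), g.length = n * r →
      pvS n c g 0 = ((List.range r).map (fun y => g.getD (c + y * n) 0)).sum := by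
  intro r
  induction r with
  | zero =>
      intro g hg
      have : g = [] := List.eq_nil_of_length_eq_zero (by simpa using hg)
      simp [this, pvS]
  | succ r ih =>
      intro g hg
      have hnle : n ≤ g.length := by
        rw [hg]; exact Nat.le_mul_of_pos_right n (by omega)
      have hlen : (g.take n).length = n := by
        rw [List.length_take]; omega
      have hdlen : (g.drop n).length = n * r := by
        rw [List.length_drop, hg, Nat.mul_succ]; omega
      have hsplit : g = g.take n ++ g.drop n := (List.take_append_drop n g).symm
      calc pvS n c g 0
          = pvS n c (g.take n) 0 + pvS n c (g.drop n) (0 + (g.take n).length) := by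
            conv_lhs => rw [hsplit]
            exact pvS_append n c _ _ 0
        _ = g.getD c 0 + ((List.range r).map (fun y => g.getD (c + (y + 1) * n) 0)).sum := by
            have h1 : pvS n c (g.drop n) n = pvS n c (g.drop n) 0 := by
              have := pvS_shift n c (g.drop n) 0
              simpa using this
            rw [hlen, Nat.zero_add, h1, pvS_row n c _ 0 (by omega), ih _ hdlen]
            congr 1
            · rw [if_pos ⟨Nat.zero_le _, by omega⟩]
              simp only [Nat.sub_zero, List.getD]
              rw [List.getElem?_take_of_lt (by omega)]
            · apply congrArg List.sum
              apply List.map_congr_left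
              intro y _
              simp only [List.getD]
              rw [List.getElem?_drop]
              congr 2
              ring
        _ = ((List.range (r + 1)).map (fun y => g.getD (c + y * n) 0)).sum := by
            rw [List.range_succ_eq_map]
            simp only [List.map_cons, List.map_map, List.sum_cons, Function.comp_def,
              Nat.succ_eq_add_one, Nat.zero_mul, Nat.add_zero]

theorem fold_length (sz : Int) (es : List (Int × Int)) (t : List Int) :
    (es.foldl (verticalAltStep sz) t).length = t.length := by
  induction es generalizing t with
  | nil => rfl
  | cons e es ih => simp [List.foldl_cons, ih, verticalAltStep]

theorem fold_getD (n : Nat) (hn : 0 < n) (c : Nat) (hc : c < n) :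
    ∀ (g : List Int) (s : Nat) (t : List Int), t.length = n →
      ((PySem.List.enumerate g (s : Int)).foldl (verticalAltStep (n : Int)) t).getD c 0
        = t.getD c 0 + pvS n c g s := by
  intro g
  induction g with
  | nil => intro s t ht; simp [PySem.List.enumerate_nil, pvS]
  | cons v g ih =>
      intro s t ht
      rw [PySem.List.enumerate_cons, List.foldl_cons]
      have hcast : (s : Int) + 1 = ((s + 1 : Nat) : Int) := by push_cast; ring
      have hmod : (PySem.Int.mod (s : Int) (n : Int)).toNat = s % n := by
        rw [PySem.Int.mod_natCast]; omega
      have hlen' : (verticalAltStep (n : Int) t ((s : Int), v)).length = n := by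
        simp [verticalAltStep, ht]
      rw [hcast, ih (s + 1) _ hlen']
      simp only [verticalAltStep, hmod]
      by_cases h : s % n = c
      · subst h
        simp only [pvS, List.getD]
        rw [List.getElem?_set_self' ]
        simp [show s % n < t.length by rw [ht]; exact Nat.mod_lt _ hn]
        ring
      · simp only [pvS, if_neg h, List.getD]
        rw [List.getElem?_set_ne (by omega)]
        ring_nf

theorem loop_eq_all (val : List Int) (sz : Int) (sum : Int) (xs : List Int) :
    verticalLoop val sz sum xs = xs.all (fun x => verticalColSum val sz x == sum) := by
  induction xs with
  | nil => rfl
  | cons x xs ih =>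
      simp only [verticalLoop, List.all_cons, ih]
      by_cases h : verticalColSum val sz x = sum
      · simp [h]
      · simp [h]

theorem colSum_eq (val : List Int) (n : Nat) (c : Nat) :
    verticalColSum val (n : Int) (c : Int) =
      ((List.range n).map (fun y => val.getD (c + y * n) 0)).sum := by
  unfold verticalColSum
  rw [PySem.List.pyRange_zero_nat, List.foldl_map]
  rw [PySem.List.foldl_add (List.range n)
    (fun y : Nat => PySem.List.pyGetD val ((c : Int) + (y : Int) * (n : Int)) 0) 0]
  rw [Int.zero_add]
  apply congrArg List.sum
  apply List.map_congr_left
  intro y _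
  rw [show (c : Int) + (y : Int) * (n : Int) = ((c + y * n : Nat) : Int) by push_cast; ring,
    PySem.List.pyGetD_natCast]

-- ===== VERDICT (by name: the statement is the Claim_ definition above) =====
theorem vertical_spec : Claim_equal_vertical := by
  intro val sz sum _ hpre
  unfold Spec_vertical vertical vertical_alt
  by_cases hsz : sz ≤ 0
  · rw [if_pos hsz, PySem.List.pyRange_one_eq_nil hsz]
    rfl
  · rw [if_neg hsz]
    rw [not_le] at hsz
    obtain ⟨n, rfl⟩ : ∃ n : Nat, sz = (n : Int) :=
      ⟨sz.toNat, (Int.toNat_of_nonneg (le_of_lt hsz)).symm⟩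
    have hn : 0 < n := by exact_mod_cast hsz
    have hlenval : n * n ≤ val.length := by
      rcases hpre with h | h
      · exact absurd h (not_le.mpr hsz)
      · exact_mod_cast h
    have hslice : PySem.List.slice val none (some ((n : Int) * (n : Int))) = val.take (n * n) := by
      rw [show ((n : Int) * (n : Int)) = ((n * n : Nat) : Int) by push_cast; ring]
      exact PySem.List.slice_to_natCast val (n * n)
    have hgridlen : (val.take (n * n)).length = n * n := by
      rw [List.length_take]; omega
    rw [hslice, Int.toNat_natCast, loop_eq_all, PySem.List.pyRange_zero_nat, List.all_map]
    set totals := (PySem.List.enumerate (val.take (n * n))).foldl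
      (verticalAltStep (n : Int)) (List.replicate n 0) with htot
    have tlen : totals.length = n := by
      rw [htot, fold_length, List.length_replicate]
    have tget : ∀ c : Nat, c < n → totals.getD c 0 = verticalColSum val (n : Int) (c : Int) := by
      intro c hc
      have h1 := fold_getD n hn c hc (val.take (n * n)) 0 (List.replicate n 0)
        (List.length_replicate)
      rw [Nat.cast_zero] at h1
      rw [htot, h1, List.getD_replicate, zero_add,
        pvS_rows n c hc n (val.take (n * n)) hgridlen, colSum_eq]
      apply congrArg List.sum
      apply List.map_congr_left
      intro y hy
      have hy' : y < n := List.mem_range.mp hy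
      have hidx : c + y * n < n * n := by
        calc c + y * n < n + y * n := by omega
          _ = (y + 1) * n := by ring
          _ ≤ n * n := Nat.mul_le_mul_right n hy'
      simp only [List.getD]
      rw [List.getElem?_take_of_lt hidx]
      exact hc
    rw [Bool.eq_iff_iff]
    simp only [List.all_eq_true, List.mem_range, Function.comp, beq_iff_eq]
    constructor
    · intro hA t ht
      obtain ⟨k, hk, rfl⟩ := List.mem_iff_getElem.mp ht
      have hk' : k < n := tlen ▸ hk
      have h2 := tget k hk'
      rw [List.getD_eq_getElem _ _ hk] at h2
      rw [h2]
      exact hA k hk'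
    · intro hB k hk
      have hkl : k < totals.length := by omega
      have h2 := tget k hk
      rw [List.getD_eq_getElem _ _ hkl] at h2
      rw [← h2]
      exact hB _ (List.getElem_mem hkl)
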